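-- pv_equiv track=rewrite | github.com/kimtaehyuk1/come_on-codingtest | 프로그래머스/귤 고르기.py | solution
-- ===== SOURCE A (Python) =====
-- def solution(k, tangerine):
--     answer = 0
--     # 딕셔너리로 어떤 숫자가 몇개있는지 짜주기
--     cnt_num = {}
--
--     for i in tangerine:
--         if i in cnt_num:
--             cnt_num[i] += 1
--         else:
--             cnt_num[i] = 1
--
--     # 이후에 딕셔너리를 개수가 많은(value값이 큰 순으로)순으로 정렬
--     sorted_cnt = sorted(cnt_num.items(), key = lambda x: x[1], reverse= True) # 출력 형태 : [(3, 2), (2, 2), (5, 2), (1, 1), (4, 1)]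
--     # 정렬된 items()에서 값만 뽑아서 리스트에 담기
--     sorted_value = [val for num,val in sorted_cnt]  # [2, 2, 2, 1, 1]
--
--     # for돌면서 종류 +1 하면서 k 가지고 놀기
--     for j in sorted_value:
--         if k <= 0:
--             break
--         k -= j
--         answer += 1
--
--     return answer
-- ===== SOURCE B (Python) =====
-- def solution(k, tangerine):
--     cnt = {}
--     for t in tangerine:
--         cnt[t] = cnt.get(t, 0) + 1
--     buckets = {}
--     for c in cnt.values():
--         buckets[c] = buckets.get(c, 0) + 1
--     answer = 0
--     for c in range(max(buckets, default=0), 0, -1):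
--         for _ in range(buckets.get(c, 0)):
--             if k <= 0:
--                 return answer
--             k -= c
--             answer += 1
--     return answer
-- ===== Notes on version B (the rewrite author's own statement) =====
-- stated objective: faster
-- what changed: B replaces A's comparison sort of the per-number counts (sorted(items, key=value, reverse=True)) by a counting sort: it builds a histogram of the counts and walks it from the largest count down, feeding the same greedy loop.
import Mathlib
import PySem

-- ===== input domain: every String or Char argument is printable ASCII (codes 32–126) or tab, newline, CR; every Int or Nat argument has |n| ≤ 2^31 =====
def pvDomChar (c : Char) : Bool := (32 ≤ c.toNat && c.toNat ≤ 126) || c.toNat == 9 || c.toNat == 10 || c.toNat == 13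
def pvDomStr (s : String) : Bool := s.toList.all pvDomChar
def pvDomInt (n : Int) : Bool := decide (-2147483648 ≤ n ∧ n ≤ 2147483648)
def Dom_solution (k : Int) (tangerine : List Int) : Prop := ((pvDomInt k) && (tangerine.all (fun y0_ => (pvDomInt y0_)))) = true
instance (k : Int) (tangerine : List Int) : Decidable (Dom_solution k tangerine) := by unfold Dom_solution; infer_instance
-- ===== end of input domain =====

-- B replaces A's comparison sort of the per-number counts by a counting sort: a second
-- histogram over the counts, walked from the largest count down (objective: alternative).

-- ===== PORT A =====
-- A's final loop 'for j in sorted_value: if k <= 0: break; k -= j; answer += 1'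
def pvLoopA : Int → Int → List Int → Int
  | _, ans, [] => ans
  | k, ans, j :: rest => if k ≤ 0 then ans else pvLoopA (k - j) (ans + 1) rest

def solution (k : Int) (tangerine : List Int) : Int :=
  let cnt_num := tangerine.foldl
    (fun d i => if d.contains i then d.insert i (d.getD i 0 + 1) else d.insert i 1)
    PySem.Dict.empty
  let sorted_cnt := PySem.List.sorted cnt_num.items (fun x => x.2) true
  let sorted_value := sorted_cnt.map (fun p => p.2)
  pvLoopA k 0 sorted_value

-- ===== PORT B =====
-- B's inner loop 'for _ in range(buckets.get(c, 0)):'; first component true = 'return answer' fired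
def pvLoopB : Int → Int → Int → List Int → Bool × Int × Int
  | _, k, ans, [] => (false, k, ans)
  | c, k, ans, _ :: rest => if k ≤ 0 then (true, k, ans) else pvLoopB c (k - c) (ans + 1) rest

-- B's outer loop 'for c in range(max(buckets, default=0), 0, -1):'
def pvOuterB (buckets : PySem.Dict Int Int) : Int → Int → List Int → Int
  | _, ans, [] => ans
  | k, ans, c :: cs =>
    let r := pvLoopB c k ans (PySem.List.pyRange 0 (buckets.getD c 0) 1)
    if r.1 then r.2.2 else pvOuterB buckets r.2.1 r.2.2 cs

def solution_alt (k : Int) (tangerine : List Int) : Int :=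
  let cnt := tangerine.foldl (fun d t => d.insert t (d.getD t 0 + 1)) PySem.Dict.empty
  let buckets := cnt.values.foldl (fun d c => d.insert c (d.getD c 0 + 1)) PySem.Dict.empty
  pvOuterB buckets k 0
    (PySem.List.pyRange (PySem.List.maxD buckets.keys (fun x => x) 0) 0 (-1))

-- ===== PRECONDITION & SPEC =====
def Spec_solution (k : Int) (tangerine : List Int) (out : Int) : Prop := out = solution_alt k tangerine
instance (k : Int) (tangerine : List Int) (out : Int) : Decidable (Spec_solution k tangerine out) := by unfold Spec_solution; infer_instance

-- ===== CLAIM (what is proved, stated in full; the proofs are below) =====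
def Claim_equal_solution : Prop := ∀ (k : Int) (tangerine : List Int), Dom_solution k tangerine → Spec_solution k tangerine (solution k tangerine)

-- ===== LEMMAS AND PROOFS =====

lemma pv_getD_zero_of_not_contains (d : PySem.Dict Int Int) (i : Int)
    (h : d.contains i = false) : d.getD i 0 = 0 := by
  simp only [PySem.Dict.contains, List.any_eq_false] at h
  simp only [PySem.Dict.getD, PySem.Dict.get?]
  rw [List.find?_eq_none.mpr]
  · rfl
  · intro p hp; exact h p hp

-- A's membership-branching counter loop is the standard counter loop
lemma pv_counterA_eq (t : List Int) :
    t.foldl (fun d i => if d.contains i then d.insert i (d.getD i 0 + 1) else d.insert i 1)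
      PySem.Dict.empty = PySem.Dict.counter t := by
  rw [← PySem.Dict.foldl_insert_getD_add_one_eq_counter]
  apply List.foldl_ext
  intro d i _
  by_cases h : d.contains i
  · simp [h]
  · simp only [Bool.not_eq_true] at h
    rw [if_neg (by simp [h]), pv_getD_zero_of_not_contains d i h]
    norm_num

-- running A's greedy loop through a constant block equals running B's inner loop
lemma pv_loopB_split (c : Int) (rest : List Int) (l : List Int) : ∀ (k ans : Int),
    pvLoopA k ans (List.replicate l.length c ++ rest) =
      (let r := pvLoopB c k ans l; if r.1 then r.2.2 else pvLoopA r.2.1 r.2.2 rest) := by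
  induction l with
  | nil => intro k ans; simp [pvLoopB]
  | cons x t ih =>
    intro k ans
    by_cases hk : k ≤ 0
    · simp [pvLoopA, pvLoopB, hk, List.replicate_succ]
    · simp only [List.length_cons, List.replicate_succ, List.cons_append, pvLoopA, pvLoopB,
        if_neg hk]
      exact ih (k - c) (ans + 1)

-- B's two nested loops are A's greedy loop over the bucket expansion
lemma pv_outerB_eq (buckets : PySem.Dict Int Int) (cs : List Int) : ∀ (k ans : Int),
    pvOuterB buckets k ans cs =
      pvLoopA k ans (cs.flatMap fun c => List.replicate (buckets.getD c 0).toNat c) := by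
  induction cs with
  | nil => intro k ans; simp [pvOuterB, pvLoopA]
  | cons c cs ih =>
    intro k ans
    have hlen : (PySem.List.pyRange 0 (buckets.getD c 0) 1).length = (buckets.getD c 0).toNat := by
      rw [PySem.List.length_pyRange_one]; omega
    rw [List.flatMap_cons, ← hlen, pv_loopB_split c _ _ k ans]
    simp only [pvOuterB]
    by_cases hs : (pvLoopB c k ans (PySem.List.pyRange 0 (buckets.getD c 0) 1)).1 = true
    · simp [hs]
    · simp only [Bool.not_eq_true] at hs
      simp [hs, ih]

lemma pv_count_flatMap_replicate (cs : List Int) (f : Int → Nat) (hnd : cs.Nodup) (x : Int) :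
    (cs.flatMap fun c => List.replicate (f c) c).count x = if x ∈ cs then f x else 0 := by
  induction cs with
  | nil => simp
  | cons c cs ih =>
    rw [List.flatMap_cons, List.count_append, List.count_replicate,
      ih (List.Nodup.of_cons hnd)]
    rcases List.nodup_cons.mp hnd with ⟨hc, _⟩
    by_cases hx : x = c
    · subst hx; simp [hc]
    · simp [hx, Ne.symm hx]

lemma pv_pairwise_flatMap (cs : List Int) (f : Int → Nat)
    (h : cs.Pairwise (fun a b => b < a)) :
    (cs.flatMap fun c => List.replicate (f c) c).Pairwise (fun a b : Int => b ≤ a) := by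
  induction cs with
  | nil => simp
  | cons c cs ih =>
    rcases List.pairwise_cons.mp h with ⟨hc, htail⟩
    rw [List.flatMap_cons]
    apply List.pairwise_append.mpr
    refine ⟨List.pairwise_replicate.mpr (by simp), ih htail, ?_⟩
    intro a ha b hb
    rw [List.eq_of_mem_replicate ha]
    rcases List.mem_flatMap.mp hb with ⟨c', hc', hb'⟩
    rw [List.eq_of_mem_replicate hb']
    exact le_of_lt (hc c' hc')

lemma pv_pyRange_down_nodup (m : Int) : (PySem.List.pyRange m 0 (-1)).Nodup := by
  rw [PySem.List.pyRange_neg_one_eq_reverse]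
  exact List.nodup_reverse.mpr (PySem.List.nodup_pyRange_one _ _)

lemma pv_pyRange_down_pairwise (m : Int) :
    (PySem.List.pyRange m 0 (-1)).Pairwise (fun a b => b < a) := by
  rw [PySem.List.pyRange_neg_one_eq_reverse]
  exact (List.pairwise_reverse).mpr (PySem.List.pairwise_lt_pyRange_one _ _)

-- A's sorted count list IS the descending bucket expansion: both are permutations of the
-- counter's value list sorted non-increasingly, and such a list is unique
lemma pv_sorted_eq_expansion_foldl (t : List Int) :
    ((PySem.List.sorted (PySem.Dict.counter t).items (fun x => x.2) true).map (fun p => p.2)) =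
      (PySem.List.pyRange
          (PySem.List.maxD
            ((PySem.Dict.counter t).values.foldl
              (fun (d : PySem.Dict Int Int) c => d.insert c (d.getD c 0 + 1)) PySem.Dict.empty).keys
            (fun x => x) 0) 0 (-1)).flatMap
        (fun c => List.replicate
          (((PySem.Dict.counter t).values.foldl
              (fun (d : PySem.Dict Int Int) c => d.insert c (d.getD c 0 + 1)) PySem.Dict.empty).getD c 0).toNat c) := by
  set V := (PySem.Dict.counter t).values with hV
  set B := V.foldl (fun (d : PySem.Dict Int Int) c => d.insert c (d.getD c 0 + 1)) PySem.Dict.empty with hB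
  set m := PySem.List.maxD B.keys (fun x => x) 0 with hm
  have hgetD : ∀ x : Int, B.getD x 0 = (V.count x : Int) := by
    intro x
    rw [hB, PySem.Dict.getD_foldl_insert_add_one]
    simp [PySem.Dict.empty, PySem.Dict.getD, PySem.Dict.get?]
  have hVpos : ∀ x ∈ V, 1 ≤ x := by
    intro x hx
    rw [hV] at hx
    simp only [PySem.Dict.values, PySem.Dict.items_counter, List.map_map, List.mem_map] at hx
    rcases hx with ⟨y, hy, rfl⟩
    have : y ∈ t := (PySem.Set.mem_ofList t y).mp hy
    have := List.count_pos_iff.mpr this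
    simp only [Function.comp]
    omega
  have hkeys : B.keys = PySem.Set.ofList V := by
    rw [hB, PySem.Dict.keys_foldl_insert]
    rw [PySem.Set.ofList_eq_foldl]
    rfl
  have hmax : ∀ x ∈ V, x ≤ m := by
    intro x hx
    have hxk : x ∈ B.keys := by rw [hkeys]; exact (PySem.Set.mem_ofList V x).mpr hx
    rcases h : PySem.List.max? B.keys (fun y : Int => y) with _ | mx
    · rw [PySem.List.max?_eq_none_iff] at h
      rw [h] at hxk; simp at hxk
    · have := PySem.List.max?_isMax h x hxk
      rw [hm]; simp only [PySem.List.maxD, h, Option.getD_some]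
      exact this
  have hperm_rhs : ((PySem.List.pyRange m 0 (-1)).flatMap
      (fun c => List.replicate (B.getD c 0).toNat c)).Perm V := by
    rw [List.perm_iff_count]
    intro x
    rw [pv_count_flatMap_replicate _ _ (pv_pyRange_down_nodup m) x, hgetD x]
    by_cases hx : x ∈ PySem.List.pyRange m 0 (-1)
    · simp [hx]
    · rw [if_neg hx]
      symm
      rw [List.count_eq_zero]
      intro hxV
      exact hx (PySem.List.mem_pyRange_neg_one.mpr ⟨by have := hVpos x hxV; omega, hmax x hxV⟩)
  have hperm_lhs : ((PySem.List.sorted (PySem.Dict.counter t).items (fun x => x.2) true).map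
      (fun p => p.2)).Perm V := by
    have := (PySem.List.sorted_perm (PySem.Dict.counter t).items (fun x : Int × Int => x.2) true).map
      (fun p : Int × Int => p.2)
    simpa [hV, PySem.Dict.values] using this
  apply List.Perm.eq_of_pairwise (le := fun a b : Int => b ≤ a)
    (fun a b _ _ h1 h2 => le_antisymm h2 h1)
  · exact (PySem.List.sorted_pairwise_rev (PySem.Dict.counter t).items (fun x : Int × Int => x.2)).map
      (fun p : Int × Int => p.2) (fun a b h => h)
  · exact pv_pairwise_flatMap _ _ (pv_pyRange_down_pairwise m)
  · exact hperm_lhs.trans hperm_rhs.symm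

-- the same, with the bucket fold written as the counter it equals
lemma pv_sorted_eq_expansion (t : List Int) :
    ((PySem.List.sorted (PySem.Dict.counter t).items (fun x => x.2) true).map (fun p => p.2)) =
      (PySem.List.pyRange
          (PySem.List.maxD (PySem.Dict.counter (PySem.Dict.counter t).values).keys
            (fun x => x) 0) 0 (-1)).flatMap
        (fun c => List.replicate
          ((PySem.Dict.counter (PySem.Dict.counter t).values).getD c 0).toNat c) := by
  rw [← PySem.Dict.foldl_insert_getD_add_one_eq_counter (PySem.Dict.counter t).values]
  exact pv_sorted_eq_expansion_foldl t

-- ===== VERDICT (by name: the statement is the Claim_ definition above) =====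
theorem solution_spec : Claim_equal_solution := by
  intro k t _
  show solution k t = solution_alt k t
  simp only [solution, solution_alt, pv_counterA_eq,
    PySem.Dict.foldl_insert_getD_add_one_eq_counter, pv_outerB_eq, pv_sorted_eq_expansion]
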